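/- GENERATED by mk_final_copies.py from the proof of the farm's unit `start_decoder.R5` (farm:start_decoder.R5.1: Proof.lean) as the
   re-elaboration sweep compiled it — do not edit. -/
import Asan.CheckWalk
import Vorbis.Spec.Units.start_decoder_R5
import Vorbis.Spec.Worked.start_decoder_R5_Lemmas

open X86 X86.User Asan Vorbis Vorbis.Spec Vorbis.Spec.StartDecoder

set_option maxRecDepth 4000
set_option maxHeartbeats 4000000

namespace Vorbis.Spec.start_decoder_R5

/-- The assertion at the head of loop 4064 (0x115ccb, `j` in r15d). -/
structure JInv (u₀ : State) (g : Ghost) (i : Nat) (A6 A6c Ai : Arena) (A : Arena × List Obj) (j : Nat) (s : State) : Prop where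
  head : Head u₀ g i A6 A6c Ai A Vorbis.L.start_decoder.loop30 j 0 s
  r13 : s.reg .r13 = addr g.f
  rbx : s.reg .rbx = addr (resAt g s.mem i)
  r14 : s.reg .r14 = addr i
  r15 : s.reg .r15 = addr j

/-- The assertion at the head of loop 4065 (0x115c5c, `k` in `[R + 18H]`, `i` spilled to `[R + 40H]`). -/
structure KInv (u₀ : State) (g : Ghost) (i : Nat) (A6 A6c Ai : Arena) (A : Arena × List Obj) (j k : Nat) (s : State) : Prop where
  head : Head u₀ g i A6 A6c Ai A Vorbis.L.start_decoder.loop29 j k s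
  r13 : s.reg .r13 = addr g.f
  rbx : s.reg .rbx = addr (resAt g s.mem i)
  r15 : s.reg .r15 = addr j
  k_le : k ≤ 8
  j_lt : j < Residue.classifications s.mem (resAt g s.mem i)
  slot18 : s.mem.readLE (g.e.reg .rsp - 1456) 4 = k
  slot40 : s.mem.readLE (g.e.reg .rsp - 1416) 4 = i

/-- The value of a byte, zero-extended to 32 bits and read as a signed number. -/
theorem byte32_toInt (c : Nat) (h : c < 256) : (BitVec.zeroExtend 32 (BitVec.ofNat 8 c)).toInt = c := by
  rw [BitVec.toInt_eq_toNat_of_lt]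
  · simp only [BitVec.toNat_setWidth, BitVec.toNat_ofNat]
    omega
  · simp only [BitVec.toNat_setWidth, BitVec.toNat_ofNat]
    omega

/-- The low half of a small number in a register, read as a signed number. -/
theorem part32_addr_toInt (j : Nat) (h : j < 2 ^ 31) : (Word.part .w32 (addr j)).toInt = j := by
  have e : (Word.part .w32 (addr j)).toNat = j := by
    rw [Asan.part32_toNat, toNat_addr j (by omega)]
    omega
  rw [BitVec.toInt_eq_toNat_of_lt]
  · rw [e]
  · rw [e]
    simp only [Width.bits]
    omega

/-- The hypotheses of the unit's statement: the layout, the code of the function, the contracts of the callees. -/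
structure Ctx (Lay : Layout) (μ : Microarch) (u₀ : State) : Prop where
  lay : Lay.hi = 0x1000000
  micro : UserX.MicroOK μ
  code : HasCodeNat Lay u₀ Vorbis.L.start_decoder.entry Vorbis.Code.code_start_decoder.nat Vorbis.L.start_decoder.size
  get_bits : ∀ (others : List Obj) (frames : List (Nat × FrameLayout)) (Blk : Block → Prop) (len : Nat),
    Calls Lay μ Vorbis.WayInv (Vorbis.conv u₀) Vorbis.L.get_bits.entry (Vorbis.Spec.get_bits.spec others frames Blk len)
  load8 : Asan.SmallCheck Lay μ Vorbis.WayInv (Vorbis.CodeOK u₀) [.rax, .rcx, .rdx] 8 Vorbis.L.__asan_load8_noabort.entry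
  store2 : Asan.SmallCheck Lay μ Vorbis.WayInv (Vorbis.CodeOK u₀) [.rax, .rcx, .rdx] 2 Vorbis.L.__asan_store2_noabort.entry
  load2 : Asan.SmallCheck Lay μ Vorbis.WayInv (Vorbis.CodeOK u₀) [.rax, .rcx, .rdx] 2 Vorbis.L.__asan_load2_noabort.entry
  load4 : Asan.SmallCheck Lay μ Vorbis.WayInv (Vorbis.CodeOK u₀) [.rax, .rcx, .rdx] 4 Vorbis.L.__asan_load4_noabort.entry
  load1 : Asan.SmallCheck Lay μ Vorbis.WayInv (Vorbis.CodeOK u₀) [.rax, .rdx] 1 Vorbis.L.__asan_load1_noabort.entry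
  error : ∀ (others : List Obj) (frames : List (Nat × FrameLayout)),
    Calls Lay μ Vorbis.WayInv (Vorbis.conv u₀) Vorbis.L.error.entry (Vorbis.Spec.error.spec others frames)

/-- **The entry of the segment** (0x115cef … 0x115cf7: `mov r15d, [rsp+24H] ; mov r13, rbp ; jmp 115ccb`): `j = 0`, `f` moves to r13. -/
theorem seg_start {Lay : Layout} {μ : Microarch} {u₀ : State} (hc : Ctx Lay μ u₀) {g : Ghost} {i : Nat} {A6 A6c Ai : Arena}
    {A : Arena × List Obj} {v : State} (hb : BodyR5 u₀ g i A6 A6c Ai A v) :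
    ReachVia Lay μ WayInv v (fun w => JInv u₀ g i A6 A6c Ai A 0 w) := by
  obtain ⟨hLay, hμ, hcode, -, -, -, -, -, -, -⟩ := hc
  have hhead : Head u₀ g i A6 A6c Ai A pc_R5 0 0 v := Head.of_entry hb
  have hfr := hb.loop.frame
  have he := hfr.entry
  v_entry he
  simp only [StartDecoder.depth] at he_room he_stack
  have hRA : g.R + 1480 = (g.e.reg .rsp).toNat := hfr.r_eq.1
  have w_rip := hfr.rip
  have c_rsp : v.reg .rsp = g.e.reg .rsp - 1480 := by
    rw [hfr.rsp]
    apply (eq_addr _ _ _).symm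
    u_omega
  have c_rbp := hb.rbp
  have c_r14 := hb.r14
  have c_rbx := hb.rbx
  obtain ⟨-, -, z24⟩ := hhead.loads
  have w_eq : Mem.EqOn Vorbis.L.textLo Vorbis.L.textHi u₀.mem v.mem := hfr.code
  have hdf : v.flags .df = false := (show abiInv _ from hfr.inv).1
  have hmx : v.mxcsr &&& 0x1F80 = 0x1F80 := (show abiInv _ from hfr.inv).2
  have hsse := Vorbis.sseOK_of_abiInv hfr.inv
  u_walk hcode [hμ.vendor] until [Vorbis.L.start_decoder.loop30] span [Vorbis.L.textLo, Vorbis.L.textHi] side (v_side)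
  -- 0x115ccb: the head of loop 4064 with `j = 0`
  have hs : Mem.SameExcept [] v.mem s_115cf7.mem := by
    rw [w_mem]
    exact Mem.SameExcept.refl _ _
  have hstk : ∀ w, w ∈ ([] : List Span) → Stk g w := by
    intro w hw
    exact absurd hw List.not_mem_nil
  have hrsp : s_115cf7.reg .rsp = addr g.R := by
    rw [w_kept .rsp rfl]
    exact hfr.rsp
  have hinv : abiInv s_115cf7 := by v_inv
  have hH := hhead.carry_stk hs hstk (pc' := Vorbis.L.start_decoder.loop30) w_rip hrsp hinv
  refine ReachVia.done ⟨hH, ?_, ?_, ?_, ?_⟩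
  · exact w_r13
  · rw [w_kept .rbx rfl, c_rbx, w_mem]
  · rw [w_kept .r14 rfl]
    exact c_r14
  · rw [w_r15]
    rfl

/-- **The head of loop 4064** (0x115ccb … 0x115cdb `jle`, then 0x115cdd … 0x115cea): the check of `r->classifications`, the test
`j < classifications`; the exit goes to segment R6 (all rows done), the other arm sets `k = 0`, spills `i` and enters loop 4065. -/
theorem seg_jhead {Lay : Layout} {μ : Microarch} {u₀ : State} (hc : Ctx Lay μ u₀) {g : Ghost} {i : Nat} {A6 A6c Ai : Arena}
    {A : Arena × List Obj} {j : Nat} {v : State} (hj : JInv u₀ g i A6 A6c Ai A j v) :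
    ReachVia Lay μ WayInv v (fun w => AtR6 u₀ g i w ∨ KInv u₀ g i A6 A6c Ai A j 0 w) := by
  obtain ⟨hLay, hμ, hcode, -, -, -, -, -, h_l1, -⟩ := hc
  have hfr := hj.head.loop.frame
  have he := hfr.entry
  v_entry he
  simp only [StartDecoder.depth] at he_room he_stack
  have hRA : g.R + 1480 = (g.e.reg .rsp).toNat := hfr.r_eq.1
  have w_rip := hfr.rip
  have c_rsp : v.reg .rsp = g.e.reg .rsp - 1480 := by
    rw [hfr.rsp]
    apply (eq_addr _ _ _).symm
    u_omega
  have c_r13 := hj.r13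
  have c_r14 := hj.r14
  have c_r15 := hj.r15
  have c_rbx := hj.rbx
  have hwh := hj.head.where_
  have hs12 := hj.head.site_rec 12 1 (by omega) (by omega)
  obtain ⟨lcls, lrb, z24⟩ := hj.head.loads
  have hjle := hj.head.j_le
  have hilt : i < 64 := by
    have h1 := hj.head.cur.lt
    have h2 := hj.head.loop.res.R1
    omega
  generalize hrdef : resAt g v.mem i = r at *
  generalize hclsdef : Residue.classifications v.mem r = cls at *
  generalize hrbdef : Residue.residue_books v.mem r = rb at *
  obtain ⟨r_lo, r_hi, r_stk, cls_lo, cls_hi, rb_lo, rb_hi, rb_stk, rb_r, rb_f, r_f⟩ := hwh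
  have har : (addr r).toNat = r := toNat_addr r (by omega)
  have w_eq : Mem.EqOn Vorbis.L.textLo Vorbis.L.textHi u₀.mem v.mem := hfr.code
  have hdf : v.flags .df = false := (show abiInv _ from hfr.inv).1
  have hmx : v.mxcsr &&& 0x1F80 = 0x1F80 := (show abiInv _ from hfr.inv).2
  have hsse := Vorbis.sseOK_of_abiInv hfr.inv
  u_walk hcode [hμ.vendor] until [Vorbis.L.start_decoder.loop29, Vorbis.L.start_decoder.cut261] span [Vorbis.L.textLo, Vorbis.L.textHi] side (v_side)
  · -- 0x115ccf: the check of `r->classifications` (a field of record `i`)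
    have hun : ShadowUntouched v.mem s_115ccf.mem := by v_untouched
    exact Vorbis.Spec.check_site hfr.shadow hun hs12 (by u_omega)
  · -- 0x115cf9 (the exit `jle` taken): all rows are done, segment R6
    rw [byte32_toInt cls (by omega), part32_addr_toInt j (by omega)] at hbr_115cdb
    have hjc : j = cls := by omega
    have hs : Mem.SameExcept [⟨(g.e.reg .rsp).toNat - 1488, (g.e.reg .rsp).toNat - 1480⟩] v.mem s_115cdb.mem := by
      u_same
    have hstk : ∀ w, w ∈ [(⟨(g.e.reg .rsp).toNat - 1488, (g.e.reg .rsp).toNat - 1480⟩ : Span)] → Stk g w := by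
      intro w hw
      rw [List.mem_singleton.mp hw]
      unfold Stk
      simp only []
      omega
    have hrsp : s_115cdb.reg .rsp = addr g.R := by
      rw [w_rsp, ← c_rsp]
      exact hfr.rsp
    have hinv : abiInv s_115cdb := by v_inv
    have hH := hj.head.carry_stk hs hstk (pc' := pc_R6) w_rip hrsp hinv
    obtain ⟨eat, ecls, erb, ecnt⟩ := hj.head.reads_eq hs (fun w hw => (hstk w hw).off)
    rw [hrdef] at eat ecls
    refine ReachVia.done (Or.inl ?_)
    apply hH.toR6
    · rw [eat, ecls, hclsdef]
      exact hjc
    · rw [w_kept .r13 rfl]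
      exact c_r13
    · rw [w_kept .r14 rfl]
      exact c_r14
    · rw [w_kept .rbx rfl, c_rbx, eat]
  · -- 0x115c5c: `k = 0`, `i` spilled: the head of loop 4065
    rw [byte32_toInt cls (by omega), part32_addr_toInt j (by omega)] at hbr_115cdb
    have hjc : j < cls := by omega
    have hs : Mem.SameExcept [⟨(g.e.reg .rsp).toNat - 1488, (g.e.reg .rsp).toNat - 1480⟩,
        ⟨(g.e.reg .rsp).toNat - 1456, (g.e.reg .rsp).toNat - 1452⟩,
        ⟨(g.e.reg .rsp).toNat - 1416, (g.e.reg .rsp).toNat - 1412⟩] v.mem s_115cea.mem := by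
      u_same
    have hstk : ∀ w, w ∈ [(⟨(g.e.reg .rsp).toNat - 1488, (g.e.reg .rsp).toNat - 1480⟩ : Span),
        ⟨(g.e.reg .rsp).toNat - 1456, (g.e.reg .rsp).toNat - 1452⟩,
        ⟨(g.e.reg .rsp).toNat - 1416, (g.e.reg .rsp).toNat - 1412⟩] → Stk g w := by
      intro w hw
      simp only [List.mem_cons, List.mem_nil_iff, or_false] at hw
      unfold Stk
      rcases hw with rfl | rfl | rfl
      · simp only []
        omega
      · simp only []
        omega
      · simp only []
        omega
    have hrsp : s_115cea.reg .rsp = addr g.R := by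
      rw [w_rsp, ← c_rsp]
      exact hfr.rsp
    have hinv : abiInv s_115cea := by v_inv
    have hH := hj.head.carry_stk hs hstk (pc' := Vorbis.L.start_decoder.loop29) w_rip hrsp hinv
    obtain ⟨eat, ecls, erb, ecnt⟩ := hj.head.reads_eq hs (fun w hw => (hstk w hw).off)
    rw [hrdef] at eat ecls
    refine ReachVia.done (Or.inr ⟨hH, ?_, ?_, ?_, Nat.zero_le _, ?_, ?_, ?_⟩)
    · rw [w_kept .r13 rfl]
      exact c_r13
    · rw [w_kept .rbx rfl, c_rbx, eat]
    · rw [w_kept .r15 rfl]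
      exact c_r15
    · rw [eat, ecls, hclsdef]
      exact hjc
    · rw [w_mem]
      u_read
    · have e : (Word.part .w32 (addr i)).toNat = i := by
        rw [Asan.part32_toNat, toNat_addr i (by omega)]
        omega
      rw [w_mem, e]
      u_read

/-- `movsxd` of a small number held in a register is the number. -/
theorem sext_addr (j : Nat) (h : j < 2 ^ 31) : Word.ofBV (BitVec.signExtend 64 (Word.part .w32 (addr j))) = addr j := by
  apply eq_addr
  have e : (Word.part .w32 (addr j)).toNat = j := by
    rw [Asan.part32_toNat, toNat_addr j (by omega)]
    omega
  rw [toNat_sext32 _ (by rw [e]; exact h), e]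

/-- `movsxd` of a small number loaded from a 32-bit slot is the number. -/
theorem sext_ofNat (k : Nat) (h : k < 2 ^ 31) : Word.ofBV (BitVec.signExtend 64 (BitVec.ofNat 32 k)) = addr k := by
  apply eq_addr
  have e : (BitVec.ofNat 32 k).toNat = k := by
    rw [BitVec.toNat_ofNat]
    omega
  rw [toNat_sext32 _ (by rw [e]; exact h), e]

/-- `shl r, 4` of a small number. -/
theorem shl4_addr (j : Nat) (h : j < 2 ^ 32) : addr j <<< 4 = addr (j * 16) := by
  apply eq_addr
  rw [UInt64.toNat_shiftLeft, toNat_addr j (by omega)]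
  have e : (4 : UInt64).toNat % 64 = 4 := by decide
  rw [e, Nat.shiftLeft_eq]
  omega

/-- A small number loaded from a 32-bit slot, read as a signed number. -/
theorem ofNat32_toInt (k : Nat) (h : k < 2 ^ 31) : (BitVec.ofNat 32 k).toInt = k := by
  have e : (BitVec.ofNat 32 k).toNat = k := by
    rw [BitVec.toNat_ofNat]
    omega
  rw [BitVec.toInt_eq_toNat_of_lt]
  · rw [e]
  · rw [e]
    omega

/-- The test `cmp dword [k], 7 ; jg` not taken: `k ≤ 7`. -/
theorem k_lt_of_br (k : Nat) (hk : k ≤ 8) (h : ¬ (7#32).toInt < (BitVec.ofNat 32 k).toInt) : k < 8 := by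
  rw [ofNat32_toInt k (by omega)] at h
  have e7 : (7#32).toInt = 7 := by decide
  rw [e7] at h
  omega

/-- A small number loaded by a 32-bit `mov`. -/
theorem ofBV32_addr (i : Nat) (h : i < 2 ^ 32) : Word.ofBV (BitVec.ofNat 32 i) = addr i := by
  apply eq_addr
  rw [toNat_ofBV32, BitVec.toNat_ofNat]
  omega

/-- `add r32, 1` of a small number. -/
theorem inc32_addr (j : Nat) (h : j + 1 < 2 ^ 32) : Word.ofBV (Word.part .w32 (addr j) + 1#32) = addr (j + 1) := by
  apply eq_addr
  have e : (Word.part .w32 (addr j)).toNat = j := by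
    rw [Asan.part32_toNat, toNat_addr j (by omega)]
    omega
  rw [toNat_ofBV32, BitVec.toNat_add, e]
  have e1 : (1#32).toNat = 1 := by decide
  rw [e1]
  omega

/-- The low byte of a little-endian read. -/
theorem readLE_low1 (m : Mem) (a : Word) (n : Nat) : m.readLE a 1 = m.readLE a (n + 1) % 256 := by
  simp only [Mem.readLE]
  have := (m.read a).toNat_lt
  omega

/-- The low two bytes of a little-endian read. -/
theorem readLE_low2 (m : Mem) (a : Word) (n : Nat) : m.readLE a 2 = m.readLE a (n + 2) % 65536 := by
  simp only [Mem.readLE]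
  have := (m.read a).toNat_lt
  have := (m.read (a + 1)).toNat_lt
  omega

/-- The assertion after `get_bits(f, 8)` returned (0x115bf0): the byte in eax, `j` sign-extended in rbp. -/
structure GInv (u₀ : State) (g : Ghost) (i : Nat) (A6 A6c Ai : Arena) (A : Arena × List Obj) (j k : Nat) (s : State) : Prop where
  head : Head u₀ g i A6 A6c Ai A Vorbis.L.start_decoder.cut256 j k s
  r13 : s.reg .r13 = addr g.f
  rbx : s.reg .rbx = addr (resAt g s.mem i)
  r15 : s.reg .r15 = addr j
  rbp : s.reg .rbp = addr j
  rax : (s.reg .rax).toNat < 256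
  k_lt : k < 8
  j_lt : j < Residue.classifications s.mem (resAt g s.mem i)
  slot18 : s.mem.readLE (g.e.reg .rsp - 1456) 4 = k
  slot40 : s.mem.readLE (g.e.reg .rsp - 1416) 4 = i

/-- **The head of loop 4065 and the test of line 4066** -/
theorem seg_khead {Lay : Layout} {μ : Microarch} {u₀ : State} (hc : Ctx Lay μ u₀) {g : Ghost} {i : Nat} {A6 A6c Ai : Arena}
    {A : Arena × List Obj} {j k : Nat} {v : State} (hk : KInv u₀ g i A6 A6c Ai A j k v) :
    ReachVia Lay μ WayInv v (fun w => (k = 8 ∧ JInv u₀ g i A6 A6c Ai A (j + 1) w) ∨ KInv u₀ g i A6 A6c Ai A j (k + 1) w ∨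
      GInv u₀ g i A6 A6c Ai A j k w) := by
  obtain ⟨hLay, hμ, hcode, h_gb, -, h_s2, -, -, h_l1, -⟩ := hc
  have hgb := h_gb A.2 g.frames' (g.Blk A) g.len
  have hfr := hk.head.loop.frame
  have he := hfr.entry
  v_entry he
  simp only [StartDecoder.depth] at he_room he_stack
  have hRA : g.R + 1480 = (g.e.reg .rsp).toNat := hfr.r_eq.1
  have w_rip := hfr.rip
  have c_rsp : v.reg .rsp = g.e.reg .rsp - 1480 := by
    rw [hfr.rsp]
    apply (eq_addr _ _ _).symm
    u_omega
  have c_r13 := hk.r13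
  have c_r15 := hk.r15
  have c_rbx := hk.rbx
  have hwh := hk.head.where_
  obtain ⟨lcls, lrb, z24⟩ := hk.head.loads
  have hkle := hk.k_le
  have hjlt := hk.j_lt
  have s18 := hk.slot18
  have s40 := hk.slot40
  have s18b : v.mem.readLE (g.e.reg .rsp - 1456) 1 = k := by
    rw [readLE_low1 _ _ 3, s18]
    omega
  have hilt : i < 64 := by
    have h1 := hk.head.cur.lt
    have h2 := hk.head.loop.res.R1
    omega
  have hnums := Nums.of_frame hfr hk.head.loop.hand
  obtain ⟨-, -, -, -, f_lo, f_hi, f_off⟩ := hnums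
  have eRA : g.RA = (g.e.reg .rsp).toNat := rfl
  rw [eRA] at f_off
  have haf : (addr g.f).toNat = g.f := toNat_addr _ (by omega)
  generalize hrdef : resAt g v.mem i = r at *
  generalize hclsdef : Residue.classifications v.mem r = cls at *
  generalize hrbdef : Residue.residue_books v.mem r = rb at *
  obtain ⟨r_lo, r_hi, r_stk, cls_lo, cls_hi, rb_lo, rb_hi, rb_stk, rb_r, rb_f, r_f⟩ := hwh
  have har : (addr r).toNat = r := toNat_addr r (by omega)
  have harb : (addr rb).toNat = rb := toNat_addr rb (by omega)
  have haj : (addr j).toNat = j := toNat_addr j (by omega)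
  have w_eq : Mem.EqOn Vorbis.L.textLo Vorbis.L.textHi u₀.mem v.mem := hfr.code
  have hdf : v.flags .df = false := (show abiInv _ from hfr.inv).1
  have hmx : v.mxcsr &&& 0x1F80 = 0x1F80 := (show abiInv _ from hfr.inv).2
  have hsse := Vorbis.sseOK_of_abiInv hfr.inv
  have esj := sext_addr j (by omega)
  have esk := sext_ofNat k (by omega)
  have eshl := shl4_addr j (by omega)
  have hak : (addr k).toNat = k := toNat_addr k (by omega)
  have haj16 : (addr (j * 16)).toNat = j * 16 := toNat_addr _ (by omega)
  u_walk hcode [hμ.vendor, esj, esk, eshl] until [Vorbis.L.start_decoder.loop29, Vorbis.L.start_decoder.loop30] span [Vorbis.L.textLo, Vorbis.L.textHi] side (v_side)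
  · -- 0x115c6e: the check of `residue_cascade[j]` (an object of the own protected frame)
    have hun : ShadowUntouched v.mem s_115c6e.mem := by v_untouched
    exact Vorbis.Spec.check_site hfr.shadow hun (hk.head.site_casc j (by omega)) (by u_omega)
  · -- 0x115beb: DF and the MXCSR masks at the entry of get_bits
    v_inv
  · -- 0x115beb: the precondition of `get_bits(f, 8)`
    have hun : ShadowUntouched v.mem s_115beb.mem := by v_untouched
    have hs : Mem.SameExcept [⟨(g.e.reg .rsp).toNat - 1488, (g.e.reg .rsp).toNat - 1480⟩] v.mem s_115beb.mem := by
      u_same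
    have hstk : ∀ w, w ∈ [(⟨(g.e.reg .rsp).toNat - 1488, (g.e.reg .rsp).toNat - 1480⟩ : Span)] → Stk g w := by
      intro w hw
      rw [List.mem_singleton.mp hw]
      unfold Stk
      simp only []
      omega
    have hrsp8 : (s_115beb.reg .rsp).toNat + 8 = g.R := by
      rw [w_rsp]
      u_omega
    refine ⟨⟨⟨?_, hfr.offText⟩, ?_, ?_⟩, ?_⟩
    · rw [hrsp8]
      exact hfr.shadow.untouched hun
    · rw [w_rdi, haf]
      exact hk.head.readerEnv
    · rw [w_rdi, haf]
      exact hk.head.bits_stk hs hstk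
    · rw [bitsArg_def, w_rsi]
      decide
  · -- 0x115ca1: the check of the store `residue_books[j][k] = -1`
    have hun : ShadowUntouched v.mem s_115ca1.mem := by v_untouched
    have hk7 := k_lt_of_br k hkle hbr_115c61
    have hsb := hk.head.site_book j k (by rw [hrdef, hclsdef]; exact hjlt) hk7
    rw [hrdef, hrbdef] at hsb
    have harb' : (UInt64.ofNat rb).toNat = rb := harb
    exact Vorbis.Spec.check_site hfr.shadow hun hsb (by u_omega)
  · -- 0x115ccb through 0x115cc2 (`k > 7`): the row is finished, `++j`
    rw [ofNat32_toInt k (by omega)] at hbr_115c61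
    have hk8 : k = 8 := by
      have e7 : (7#32).toInt = 7 := by decide
      rw [e7] at hbr_115c61
      omega
    have hhead := hk.head
    rw [hk8] at hhead
    have hs : Mem.SameExcept [] v.mem s_115cc7.mem := by
      rw [w_mem]
      exact Mem.SameExcept.refl _ _
    have hstk : ∀ w, w ∈ ([] : List Span) → Stk g w := by
      intro w hw
      exact absurd hw List.not_mem_nil
    have hrsp : s_115cc7.reg .rsp = addr g.R := by
      rw [w_kept .rsp rfl]
      exact hfr.rsp
    have hinv : abiInv s_115cc7 := by v_inv
    have hH := hhead.next_row.carry_stk hs hstk (pc' := Vorbis.L.start_decoder.loop30) w_rip hrsp hinv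
    refine ReachVia.done (Or.inl ⟨hk8, hH, ?_, ?_, ?_, ?_⟩)
    · rw [w_kept .r13 rfl]
      exact c_r13
    · rw [w_kept .rbx rfl, c_rbx, w_mem, hrdef]
    · rw [w_r14]
      exact ofBV32_addr i (by omega)
    · rw [w_r15]
      exact inc32_addr j (by omega)
  · -- 0x115bf0: `get_bits` returned
    have hk7 := k_lt_of_br k hkle hbr_115c61
    have hpost : GetBitsSpecPost (g.Blk A) g.len (s_115beb.reg .rdi).toNat (bitsArg s_115beb) s_115beb s_115bebr := w_post
    rw [w_rdi_115beb, haf] at hpost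
    simp only [X86.User.Spec.footprint, vspec, w_rsp_115beb, w_rdi_115beb, haf] at w_same
    rw [w_mem_115beb] at w_same
    have hs : Mem.SameExcept [⟨(g.e.reg .rsp).toNat - 1840, (g.e.reg .rsp).toNat - 1480⟩,
        ⟨g.f + 48, g.f + 56⟩, ⟨g.f + 84, g.f + 96⟩, ⟨g.f + 136, g.f + 144⟩, ⟨g.f + 1484, g.f + 1749⟩,
        ⟨g.f + 1752, g.f + 1784⟩] v.mem s_115bebr.mem := by
      u_same
    have hoff : ∀ w, w ∈ [(⟨(g.e.reg .rsp).toNat - 1840, (g.e.reg .rsp).toNat - 1480⟩ : Span),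
        ⟨g.f + 48, g.f + 56⟩, ⟨g.f + 84, g.f + 96⟩, ⟨g.f + 136, g.f + 144⟩, ⟨g.f + 1484, g.f + 1749⟩,
        ⟨g.f + 1752, g.f + 1784⟩] → OffArena g w := by
      intro w hw
      simp only [List.mem_cons, List.mem_nil_iff, or_false] at hw
      unfold OffArena
      rcases hw with rfl | rfl | rfl | rfl | rfl | rfl <;> simp only [] <;> omega
    have hbits : Bits (g.Blk A) g.len s_115bebr.mem g.f := hpost.bits.bits
    have hrsp : s_115bebr.reg .rsp = addr g.R := by
      rw [w_rsp, ← c_rsp]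
      exact hfr.rsp
    have hinv : abiInv s_115bebr := w_inv
    have hH := hk.head.carry (pc' := Vorbis.L.start_decoder.cut256) hs hoff hbits w_rip hrsp hinv
    obtain ⟨eat, ecls, -, -⟩ := hk.head.reads_eq hs hoff
    rw [hrdef] at eat ecls
    have hres := hpost.bits.result
    have e8 : bitsArg s_115beb = 8 := by
      rw [bitsArg_def, w_rsi_115beb]
      decide
    rw [e8] at hres
    refine ReachVia.done (Or.inr (Or.inr ⟨hH, ?_, ?_, ?_, w_rbp, hres.2 (by omega), hk7, ?_, ?_, ?_⟩))
    · rw [w_kept .r13 rfl]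
      exact c_r13
    · rw [w_kept .rbx rfl, c_rbx, eat]
    · rw [w_kept .r15 rfl]
      exact c_r15
    · rw [eat, ecls, hclsdef]
      exact hjlt
    · u_frame s18
    · u_frame s40
  · -- 0x115c5c through 0x115c8a … 0x115c57 (the bit is clear): `residue_books[j][k] = -1`, `++k`
    have hk7 := k_lt_of_br k hkle hbr_115c61
    have ea : addr (j * 16) + UInt64.ofNat rb + addr k * 2 = addr (rb + 16 * j + 2 * k) := by
      show addr (j * 16) + addr rb + addr k * 2 = _
      rw [addr_add_addr, addr_mul_lit, addr_add_addr]
      exact congrArg addr (by omega)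
    have e1 : (BitVec.ofNat 32 k + 1#32).toNat = k + 1 := by
      rw [BitVec.toNat_add, BitVec.toNat_ofNat]
      have e1' : (1#32).toNat = 1 := by decide
      rw [e1']
      omega
    rw [ea, e1] at w_mem
    have hs1 : Mem.SameExcept [⟨(g.e.reg .rsp).toNat - 1488, (g.e.reg .rsp).toNat - 1480⟩] v.mem
        (v.mem.writeLE (g.e.reg .rsp - 1488) 8 1137830) := by
      u_same
    have hstk1 : ∀ w, w ∈ [(⟨(g.e.reg .rsp).toNat - 1488, (g.e.reg .rsp).toNat - 1480⟩ : Span)] → Stk g w := by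
      intro w hw
      rw [List.mem_singleton.mp hw]
      unfold Stk
      simp only []
      omega
    have hs2 : Mem.SameExcept [⟨(g.e.reg .rsp).toNat - 1456, (g.e.reg .rsp).toNat - 1452⟩]
        ((v.mem.writeLE (g.e.reg .rsp - 1488) 8 1137830).writeLE (addr (rb + 16 * j + 2 * k)) 2 65535)
        s_115c57.mem := by
      u_same
    have hstk2 : ∀ w, w ∈ [(⟨(g.e.reg .rsp).toNat - 1456, (g.e.reg .rsp).toNat - 1452⟩ : Span)] → Stk g w := by
      intro w hw
      rw [List.mem_singleton.mp hw]
      unfold Stk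
      simp only []
      omega
    have hrsp : s_115c57.reg .rsp = addr g.R := by
      rw [w_rsp, ← c_rsp]
      exact hfr.rsp
    have hinv : abiInv s_115c57 := by v_inv
    have hnew : BookOK v.mem g.f (sint16 (65535 % 2 ^ 16)) := BookOK.minus_one _ _
    have hrb0 : Residue.residue_books v.mem (resAt g v.mem i) = rb := by
      rw [hrdef, hrbdef]
    have hj' : j < Residue.classifications v.mem (resAt g v.mem i) := by
      rw [hrdef, hclsdef]
      exact hjlt
    rw [← hrb0] at hs2
    have hH := hk.head.store_between (pc' := Vorbis.L.start_decoder.loop29) hk7 hj' _ 65535 hs1 hstk1 hs2 hstk2 hnew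
      w_rip hrsp hinv
    obtain ⟨eat, ecls⟩ := hk.head.store_between_eqs hk7 hj' _ 65535 hs1 hstk1 hs2 hstk2 hnew
    rw [hrdef] at eat ecls
    rw [hclsdef] at ecls
    refine ReachVia.done (Or.inr (Or.inl ⟨hH, ?_, ?_, ?_, by omega, ?_, ?_, ?_⟩))
    · rw [w_kept .r13 rfl]
      exact c_r13
    · rw [w_kept .rbx rfl, c_rbx, eat]
    · rw [w_kept .r15 rfl]
      exact c_r15
    · rw [eat, ecls]
      exact hjlt
    · rw [w_mem]
      u_read
    · u_frame s40

/-- The word `mov [m16], ax` stores from a byte value. -/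
theorem word16_of_byte (z : Nat) (h : z < 256) : (BitVec.setWidth 16 (BitVec.zeroExtend 32 (BitVec.ofNat 16 z))).toNat = z := by
  simp only [BitVec.toNat_setWidth, BitVec.toNat_ofNat]
  omega

/-- `movsx r32, word` of a byte value, read as a signed number. -/
theorem sx16 (z : Nat) (h : z < 256) : (BitVec.signExtend 32 (BitVec.ofNat 16 (z % 65536))).toInt = z := by
  have e : (BitVec.ofNat 16 (z % 65536)).toInt = z := by
    rw [BitVec.toInt_eq_toNat_of_lt]
    · simp only [BitVec.toNat_ofNat]
      omega
    · simp only [BitVec.toNat_ofNat]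
      omega
  rw [BitVec.toInt_signExtend_of_le (by omega), e]

/-- The 2-byte read of the 4-byte spill of a byte value. -/
theorem rd2 (m : Mem) (a : Word) (z : Nat) (h : z < 256) :
    (m.writeLE a 4 (Word.part .w32 (addr z)).toNat).readLE a 2 = z := by
  rw [readLE_low2 _ _ 2, Mem.readLE_writeLE_same _ _ _ _ (by omega), Asan.part32_toNat, toNat_addr z (by omega)]
  omega

/-- **The tested arm of line 4067 / 4068** (0x115bf0 … 0x115c55, then `++k` or `error`) -/
theorem seg_kstore {Lay : Layout} {μ : Microarch} {u₀ : State} (hc : Ctx Lay μ u₀) {g : Ghost} {i : Nat} {A6 A6c Ai : Arena}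
    {A : Arena × List Obj} {j k : Nat} {v : State} (hG : GInv u₀ g i A6 A6c Ai A j k v) :
    ReachVia Lay μ WayInv v (fun w => KInv u₀ g i A6 A6c Ai A j (k + 1) w ∨ AtERR u₀ g w) := by
  obtain ⟨hLay, hμ, hcode, -, h_l8, h_s2, h_l2, h_l4, -, h_err⟩ := hc
  have herr := h_err A.2 g.frames'
  have hfr := hG.head.loop.frame
  have he := hfr.entry
  v_entry he
  simp only [StartDecoder.depth] at he_room he_stack
  have hRA : g.R + 1480 = (g.e.reg .rsp).toNat := hfr.r_eq.1
  have w_rip := hfr.rip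
  have c_rsp : v.reg .rsp = g.e.reg .rsp - 1480 := by
    rw [hfr.rsp]
    apply (eq_addr _ _ _).symm
    u_omega
  have c_r13 := hG.r13
  have c_r15 := hG.r15
  have c_rbx := hG.rbx
  have c_rbp := hG.rbp
  obtain ⟨z, hz⟩ : ∃ z : Nat, (v.reg .rax).toNat = z := ⟨_, rfl⟩
  have c_rax : v.reg .rax = addr z := eq_addr _ _ hz
  have hz256 : z < 256 := by
    rw [← hz]
    exact hG.rax
  have hwh := hG.head.where_
  obtain ⟨lcls, lrb, z24⟩ := hG.head.loads
  have hk7 := hG.k_lt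
  have hjlt := hG.j_lt
  have s18 := hG.slot18
  have s40 := hG.slot40
  have hilt : i < 64 := by
    have h1 := hG.head.cur.lt
    have h2 := hG.head.loop.res.R1
    omega
  have hnums := Nums.of_frame hfr hG.head.loop.hand
  obtain ⟨-, -, -, -, f_lo, f_hi, f_off⟩ := hnums
  have eRA : g.RA = (g.e.reg .rsp).toNat := rfl
  rw [eRA] at f_off
  have haf : (addr g.f).toNat = g.f := toNat_addr _ (by omega)
  have lcnt : v.mem.readLE (addr g.f + 160) 4 = v.mem.u32 (g.f + 160) := by
    simp only [vfield]
  have hF1 := ((hG.head.loop.mid.own.cb0 (by omega)).ok (hG.head.loop.mid.own.nonnull (by omega))).F1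
  have hcc : stb_vorbis.codebook_count v.mem g.f = sint32 (v.mem.u32 (g.f + 160)) := by
    simp only [vacc, voff]
    rfl
  have hult := Mem.u32_lt v.mem (g.f + 160)
  generalize hcntdef : v.mem.u32 (g.f + 160) = cnt at *
  generalize hrdef : resAt g v.mem i = r at *
  generalize hclsdef : Residue.classifications v.mem r = cls at *
  generalize hrbdef : Residue.residue_books v.mem r = rb at *
  obtain ⟨r_lo, r_hi, r_stk, cls_lo, cls_hi, rb_lo, rb_hi, rb_stk, rb_r, rb_f, r_f⟩ := hwh
  have har : (addr r).toNat = r := toNat_addr r (by omega)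
  have harb : (addr rb).toNat = rb := toNat_addr rb (by omega)
  have harb' : (UInt64.ofNat rb).toNat = rb := harb
  have haj : (addr j).toNat = j := toNat_addr j (by omega)
  have hak : (addr k).toNat = k := toNat_addr k (by omega)
  have haz : (addr z).toNat = z := toNat_addr z (by omega)
  have haj16 : (addr (j * 16)).toNat = j * 16 := toNat_addr _ (by omega)
  have esk := sext_ofNat k (by omega)
  have eshl := shl4_addr j (by omega)
  have w_eq : Mem.EqOn Vorbis.L.textLo Vorbis.L.textHi u₀.mem v.mem := hfr.code
  have hdf : v.flags .df = false := (show abiInv _ from hfr.inv).1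
  have hmx : v.mxcsr &&& 0x1F80 = 0x1F80 := (show abiInv _ from hfr.inv).2
  have hsse := Vorbis.sseOK_of_abiInv hfr.inv
  u_walk hcode [hμ.vendor, esk, eshl] until [Vorbis.L.start_decoder.loop29, Vorbis.L.start_decoder.cut4] span [Vorbis.L.textLo, Vorbis.L.textHi] side (v_side)
  · -- 0x115bf8: the check of `r->residue_books`
    have hun : ShadowUntouched v.mem s_115bf8.mem := by v_untouched
    have hs24 := hG.head.site_rec 24 8 (by omega) (by omega)
    rw [hrdef] at hs24
    exact Vorbis.Spec.check_site hfr.shadow hun hs24 (by u_omega)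
  · -- 0x115c1a: the check of the store `residue_books[j][k] = get_bits(f, 8)`
    have hun : ShadowUntouched v.mem s_115c1a.mem := by v_untouched
    have hsb := hG.head.site_book j k (by rw [hrdef, hclsdef]; exact hjlt) hk7
    rw [hrdef, hrbdef] at hsb
    exact Vorbis.Spec.check_site hfr.shadow hun hsb (by u_omega)
  · -- 0x115c37: the check of the load of the slot just stored
    have hun : ShadowUntouched v.mem s_115c37.mem := by v_untouched
    have hsb := hG.head.site_book j k (by rw [hrdef, hclsdef]; exact hjlt) hk7
    rw [hrdef, hrbdef] at hsb
    exact Vorbis.Spec.check_site hfr.shadow hun hsb (by u_omega)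
  · -- 0x115c49: the check of `f->codebook_count`
    have hun : ShadowUntouched v.mem s_115c49.mem := by v_untouched
    exact Vorbis.Spec.check_site hfr.shadow hun (hG.head.site_f 160 4 (by omega) (by omega)) (by u_omega)
  · -- 0x115cb8: DF and the MXCSR masks at the entry of `error`
    v_inv
  · -- 0x115cb8: the precondition of `error(f, VORBIS_invalid_setup)`
    have hun : ShadowUntouched v.mem s_115cb8.mem := by v_untouched
    have hrsp8 : (s_115cb8.reg .rsp).toNat + 8 = g.R := by
      rw [w_rsp]
      u_omega
    refine ⟨⟨?_, hfr.offText⟩, ?_⟩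
    · rw [hrsp8]
      exact hfr.shadow.untouched hun
    · rw [w_rdi, haf]
      exact hG.head.objLiveIn
  · -- 0x115cbd: `error` returned 0; `jmp 113b22`
    have hrd2 := rd2 v.mem (g.e.reg .rsp - 1432) z hz256
    have ea : addr (j * 16) + UInt64.ofNat rb + addr k * 2 = addr (rb + 16 * j + 2 * k) := by
      show addr (j * 16) + addr rb + addr k * 2 = _
      rw [addr_add_addr, addr_mul_lit, addr_add_addr]
      exact congrArg addr (by omega)
    have hab : (addr (rb + 16 * j + 2 * k)).toNat = rb + 16 * j + 2 * k := toNat_addr _ (by omega)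
    rw [hrd2, word16_of_byte z hz256, ea] at w_mem_115cb8
    have hp := w_post
    have w_eq := Vorbis.conv_code_eqOn w_code
    simp only [X86.User.Spec.footprint, vspec, w_rsp_115cb8, w_rdi_115cb8, haf] at w_same
    rw [w_mem_115cb8] at w_same
    have hs : Mem.SameExcept [⟨(g.e.reg .rsp).toNat - 1536, (g.e.reg .rsp).toNat - 1480⟩,
        ⟨(g.e.reg .rsp).toNat - 1432, (g.e.reg .rsp).toNat - 1416⟩,
        ⟨rb + 16 * j + 2 * k, rb + 16 * j + 2 * k + 2⟩, ⟨g.f + 140, g.f + 144⟩] v.mem s_115cb8r.mem := by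
      u_same
    have hrax : s_115cb8r.reg .rax = 0 := hp.1
    have hdfr : s_115cb8r.flags .df = false := (show X86.User.abiInv _ from w_inv).1
    have hmxr : s_115cb8r.mxcsr &&& 8064 = 8064 := (show X86.User.abiInv _ from w_inv).2
    clear w_same w_post hp
    u_walk hcode [hμ.vendor] until [Vorbis.L.start_decoder.cut4] span [Vorbis.L.textLo, Vorbis.L.textHi] side (v_side)
    -- 0x113b22: the epilogue, with eax = 0 and SD.ERR
    rw [← w_mem] at hs
    have hcalm : ∀ w, w ∈ [(⟨(g.e.reg .rsp).toNat - 1536, (g.e.reg .rsp).toNat - 1480⟩ : Span),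
        ⟨(g.e.reg .rsp).toNat - 1432, (g.e.reg .rsp).toNat - 1416⟩,
        ⟨rb + 16 * j + 2 * k, rb + 16 * j + 2 * k + 2⟩, ⟨g.f + 140, g.f + 144⟩] →
        Calm g (bookBlock g v.mem i) w := by
      intro w hw
      simp only [List.mem_cons, List.mem_nil_iff, or_false] at hw
      unfold Calm Stk bookBlock
      rw [hrdef, hrbdef, hclsdef]
      rcases hw with rfl | rfl | rfl | rfl <;> simp only [] <;> omega
    have hrsp : s_115cbd.reg .rsp = addr g.R := by
      rw [w_rsp, ← c_rsp]
      exact hfr.rsp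
    have hinv : abiInv s_115cbd := by
      refine ⟨?_, ?_⟩
      · rw [w_flags]
        exact hdfr
      · rw [w_mxcsr]
        exact hmxr
    have hH := hG.head.carry0 (pc' := pc_ERR) hs hcalm w_rip hrsp hinv
    refine ReachVia.done (Or.inr (hH.toERR ?_))
    rw [w_rax]
    rfl
  · -- 0x115c5c through 0x115c57: the stored byte is a codebook number, `++k`
    have hrd2 := rd2 v.mem (g.e.reg .rsp - 1432) z hz256
    have ea : addr (j * 16) + UInt64.ofNat rb + addr k * 2 = addr (rb + 16 * j + 2 * k) := by
      show addr (j * 16) + addr rb + addr k * 2 = _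
      rw [addr_add_addr, addr_mul_lit, addr_add_addr]
      exact congrArg addr (by omega)
    have e1 : (BitVec.ofNat 32 k + 1#32).toNat = k + 1 := by
      rw [BitVec.toNat_add, BitVec.toNat_ofNat]
      have e1' : (1#32).toNat = 1 := by decide
      rw [e1']
      omega
    rw [hrd2, word16_of_byte z hz256, ea, e1] at w_mem
    rw [hrd2, word16_of_byte z hz256, sx16 z hz256] at hbr_115c55
    -- the count is a small positive number
    have hcnt : 1 ≤ cnt ∧ cnt ≤ 256 := by
      have hc := sint32_cases cnt
      rw [hcc] at hF1
      omega
    rw [ofNat32_toInt cnt (by omega)] at hbr_115c55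
    have hlt : (z : Int) < stb_vorbis.codebook_count v.mem g.f := by
      have hc := sint32_cases cnt
      rw [hcc]
      omega
    have hnew : BookOK v.mem g.f (sint16 (z % 2 ^ 16)) := BookOK.of_byte _ _ z hz256 hlt
    have hs1 : Mem.SameExcept [⟨(g.e.reg .rsp).toNat - 1488, (g.e.reg .rsp).toNat - 1480⟩,
        ⟨(g.e.reg .rsp).toNat - 1432, (g.e.reg .rsp).toNat - 1416⟩] v.mem
        ((((v.mem.writeLE (g.e.reg .rsp - 1432) 4 (Word.part .w32 (addr z)).toNat).writeLE (g.e.reg .rsp - 1488)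
          8 1137661).writeLE (g.e.reg .rsp - 1424) 8 (UInt64.toNat (addr k + addr k))).writeLE
          (g.e.reg .rsp - 1488) 8 1137695) := by
      u_same
    have hstk1 : ∀ w, w ∈ [(⟨(g.e.reg .rsp).toNat - 1488, (g.e.reg .rsp).toNat - 1480⟩ : Span),
        ⟨(g.e.reg .rsp).toNat - 1432, (g.e.reg .rsp).toNat - 1416⟩] → Stk g w := by
      intro w hw
      simp only [List.mem_cons, List.mem_nil_iff, or_false] at hw
      unfold Stk
      rcases hw with rfl | rfl <;> simp only [] <;> omega
    have hs2 : Mem.SameExcept [⟨(g.e.reg .rsp).toNat - 1488, (g.e.reg .rsp).toNat - 1480⟩,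
        ⟨(g.e.reg .rsp).toNat - 1456, (g.e.reg .rsp).toNat - 1452⟩]
        (((((v.mem.writeLE (g.e.reg .rsp - 1432) 4 (Word.part .w32 (addr z)).toNat).writeLE (g.e.reg .rsp - 1488)
          8 1137661).writeLE (g.e.reg .rsp - 1424) 8 (UInt64.toNat (addr k + addr k))).writeLE
          (g.e.reg .rsp - 1488) 8 1137695).writeLE (addr (rb + 16 * j + 2 * k)) 2 z)
        s_115c57.mem := by
      u_same
    have hstk2 : ∀ w, w ∈ [(⟨(g.e.reg .rsp).toNat - 1488, (g.e.reg .rsp).toNat - 1480⟩ : Span),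
        ⟨(g.e.reg .rsp).toNat - 1456, (g.e.reg .rsp).toNat - 1452⟩] → Stk g w := by
      intro w hw
      simp only [List.mem_cons, List.mem_nil_iff, or_false] at hw
      unfold Stk
      rcases hw with rfl | rfl <;> simp only [] <;> omega
    have hrsp : s_115c57.reg .rsp = addr g.R := by
      rw [w_rsp, ← c_rsp]
      exact hfr.rsp
    have hinv : abiInv s_115c57 := by v_inv
    have hrb0 : Residue.residue_books v.mem (resAt g v.mem i) = rb := by
      rw [hrdef, hrbdef]
    have hj' : j < Residue.classifications v.mem (resAt g v.mem i) := by
      rw [hrdef, hclsdef]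
      exact hjlt
    rw [← hrb0] at hs2
    have hH := hG.head.store_between (pc' := Vorbis.L.start_decoder.loop29) hk7 hj' _ z hs1 hstk1 hs2 hstk2 hnew
      w_rip hrsp hinv
    obtain ⟨eat, ecls⟩ := hG.head.store_between_eqs hk7 hj' _ z hs1 hstk1 hs2 hstk2 hnew
    rw [hrdef] at eat ecls
    rw [hclsdef] at ecls
    refine ReachVia.done (Or.inl ⟨hH, ?_, ?_, ?_, by omega, ?_, ?_, ?_⟩)
    · rw [w_kept .r13 rfl]
      exact c_r13
    · rw [w_kept .rbx rfl, c_rbx, eat]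
    · rw [w_kept .r15 rfl]
      exact c_r15
    · rw [eat, ecls]
      exact hjlt
    · rw [w_mem]
      u_read
    · u_frame s40

/-- **Loop 4065** (`for (k = 0; k < 8; ++k)`), from any head state: by induction on the fuel `n ≥ 8 − k`. It ends at the head of
loop 4064 with the row counted, or in the epilogue (a book number out of range). -/
theorem k_loop {Lay : Layout} {μ : Microarch} {u₀ : State} (hc : Ctx Lay μ u₀) {g : Ghost} {i : Nat} {A6 A6c Ai : Arena}
    {A : Arena × List Obj} {j : Nat} :
    ∀ (n k : Nat) (v : State), 8 - k ≤ n → KInv u₀ g i A6 A6c Ai A j k v →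
      ReachVia Lay μ WayInv v (fun w => JInv u₀ g i A6 A6c Ai A (j + 1) w ∨ AtERR u₀ g w) := by
  intro n
  induction n with
  | zero =>
    intro k v hn hk
    refine (seg_khead hc hk).trans ?_
    intro w hw
    rcases hw with ⟨_, hJ⟩ | hK | hG
    · exact ReachVia.done (Or.inl hJ)
    · exfalso
      have := hK.k_le
      omega
    · exfalso
      have := hG.k_lt
      omega
  | succ n ih =>
    intro k v hn hk
    refine (seg_khead hc hk).trans ?_
    intro w hw
    rcases hw with ⟨_, hJ⟩ | hK | hG
    · exact ReachVia.done (Or.inl hJ)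
    · have := hK.k_le
      exact ih (k + 1) w (by omega) hK
    · refine (seg_kstore hc hG).trans ?_
      intro w' hw'
      rcases hw' with hK | hE
      · have := hK.k_le
        exact ih (k + 1) w' (by omega) hK
      · exact ReachVia.done (Or.inr hE)

/-- **Loop 4064** (`for (j = 0; j < r->classifications; ++j)`), from any head state: by induction on the fuel `n ≥ 64 − j`
(`classifications ≤ 64`: R6). -/
theorem j_loop {Lay : Layout} {μ : Microarch} {u₀ : State} (hc : Ctx Lay μ u₀) {g : Ghost} {i : Nat} {A6 A6c Ai : Arena}
    {A : Arena × List Obj} :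
    ∀ (n j : Nat) (v : State), 64 - j ≤ n → JInv u₀ g i A6 A6c Ai A j v →
      ReachVia Lay μ WayInv v (fun w => AtR6 u₀ g i w ∨ AtERR u₀ g w) := by
  intro n
  induction n with
  | zero =>
    intro j v hn hj
    refine (seg_jhead hc hj).trans ?_
    intro w hw
    rcases hw with h6 | hK
    · exact ReachVia.done (Or.inl h6)
    · exfalso
      have h1 := hK.j_lt
      have h2 := hK.head.cur.R6.2
      omega
  | succ n ih =>
    intro j v hn hj
    refine (seg_jhead hc hj).trans ?_
    intro w hw
    rcases hw with h6 | hK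
    · exact ReachVia.done (Or.inl h6)
    · have h1 := hK.j_lt
      have h2 := hK.head.cur.R6.2
      refine (k_loop hc 8 0 w (by omega) hK).trans ?_
      intro w' hw'
      rcases hw' with hJ | hE
      · exact ih (j + 1) w' (by omega) hJ
      · exact ReachVia.done (Or.inr hE)

end Vorbis.Spec.start_decoder_R5

/-- Segment R5 of `start_decoder` (0x115cef … 0x115cf9 / 0x113b22; stb_vorbis_fixed.c 4064 – 4073): the two loops that fill
`r->residue_books[j][k]` with `get_bits(f, 8)` (tested `< codebook_count`) or `−1`. The entry (`seg_start`), the two loops by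
induction on their bounds (`j_loop`, `k_loop`) over the walked pieces `seg_jhead`, `seg_khead`, `seg_kstore`. -/
theorem Vorbis.Spec.Worked.start_decoder_R5_ok : Vorbis.Spec.start_decoder_R5.Statement := by
  unfold Vorbis.Spec.start_decoder_R5.Statement
  intro Lay hLay μ hμ u₀ hcode h_gb h_l8 h_s2 h_l2 h_l4 h_l1 h_err g i v hat
  have hc : Vorbis.Spec.start_decoder_R5.Ctx Lay μ u₀ := ⟨hLay, hμ, hcode, h_gb, h_l8, h_s2, h_l2, h_l4, h_l1, h_err⟩
  obtain ⟨A6, A6c, Ai, A, hb⟩ := hat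
  refine (Vorbis.Spec.start_decoder_R5.seg_start hc hb).trans ?_
  intro w hw
  exact Vorbis.Spec.start_decoder_R5.j_loop hc 64 0 w (by omega) hw
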